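-- pv_equiv track=rewrite | github.com/sgsokol/IsoSolve | isosolve.py | hascumo
-- ===== SOURCE A (Python) =====
-- def hascumo(s1, s2):
--     "return a cumulated string (or None if not conformant) for binary cumomers in s1 and s2. E.g. 01x+11x => x1x"
--     if len(s1) != len(s2) or len(s1) == 0:
--         return None
--     res=list(s1)
--     ndif=0
--     for i,c1 in enumerate(s1):
--         c2=s2[i]
--         if c1 == c2:
--             res[i]=c1
--         elif c1 in "01" and c2 in "01" and ndif == 0:
--             ndif += 1
--             res[i]="x"
--         else:
--             return None
--     return "".join(res)
-- ===== SOURCE B (Python) =====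
-- def hascumo(s1, s2):
--     "return a cumulated string (or None if not conformant) for binary cumomers in s1 and s2. E.g. 01x+11x => x1x"
--     if len(s1) != len(s2) or len(s1) == 0:
--         return None
--     diffs = [i for i, (a, b) in enumerate(zip(s1, s2)) if a != b]
--     if not diffs:
--         return s1
--     if len(diffs) == 1:
--         i = diffs[0]
--         if s1[i] in "01" and s2[i] in "01":
--             return s1[:i] + "x" + s1[i + 1:]
--     return None
-- ===== Notes on version B (the rewrite author's own statement) =====
-- stated objective: alternative
-- what changed: Replaced A's single pass that mutates a char buffer while tracking a diff counter with early exits by a collect-then-classify decomposition: first list all differing positions, then decide by the count of differences (0 -> s1, 1 valid -> splice 'x' via slicing, else None).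
import Mathlib
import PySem

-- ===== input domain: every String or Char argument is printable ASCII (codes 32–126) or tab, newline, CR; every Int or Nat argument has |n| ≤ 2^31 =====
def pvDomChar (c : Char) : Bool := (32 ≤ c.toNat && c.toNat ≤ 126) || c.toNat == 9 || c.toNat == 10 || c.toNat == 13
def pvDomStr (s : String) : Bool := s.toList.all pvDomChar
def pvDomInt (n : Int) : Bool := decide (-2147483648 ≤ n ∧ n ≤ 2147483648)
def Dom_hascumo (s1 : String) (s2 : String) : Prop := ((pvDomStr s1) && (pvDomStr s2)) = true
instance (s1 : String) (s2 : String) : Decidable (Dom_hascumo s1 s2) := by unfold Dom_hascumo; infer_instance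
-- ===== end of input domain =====

-- B replaces A's mutating single pass (buffer + diff counter + early exit) by collect-the-differing-positions then classify; same values everywhere (alternative decomposition, no speed claim).

-- ===== PORT A =====
-- loop over enumerate(s1) with c2 = s2[i]: under the length guard this walks the two lists in step
def goA : List Char → List Char → Nat → List Char → Option (List Char)
  | [], _, _, acc => some acc.reverse
  | c1 :: t1, l2, ndif, acc =>
      match l2 with
      | [] => none
      | c2 :: t2 =>
        if c1 = c2 then goA t1 t2 ndif (c1 :: acc)
        else if (c1 = '0' ∨ c1 = '1') ∧ (c2 = '0' ∨ c2 = '1') ∧ ndif = 0 then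
          goA t1 t2 (ndif + 1) ('x' :: acc)
        else none

def hascumo (s1 : String) (s2 : String) : Option String :=
  let l1 := s1.toList
  let l2 := s2.toList
  if l1.length ≠ l2.length ∨ l1.length = 0 then none
  else (goA l1 l2 0 []).map String.ofList

-- ===== PORT B =====
-- [i for i, (a, b) in enumerate(zip(s1, s2)) if a != b]
def bDiffs (z : List (Char × Char)) : List Int :=
  ((PySem.List.enumerate z).filter (fun p => p.2.1 != p.2.2)).map Prod.fst

def hascumo_alt (s1 : String) (s2 : String) : Option String :=
  let l1 := s1.toList
  let l2 := s2.toList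
  if l1.length ≠ l2.length ∨ l1.length = 0 then none
  else
    match bDiffs (l1.zip l2) with
    | [] => some s1
    | [i] =>
        if (PySem.List.pyGetD l1 i ' ' = '0' ∨ PySem.List.pyGetD l1 i ' ' = '1') ∧
           (PySem.List.pyGetD l2 i ' ' = '0' ∨ PySem.List.pyGetD l2 i ' ' = '1') then
          some (String.ofList (PySem.List.slice l1 none (some i) ++ 'x' :: PySem.List.slice l1 (some (i + 1)) none))
        else none
    | _ => none

-- ===== PRECONDITION & SPEC =====
def Spec_hascumo (s1 : String) (s2 : String) (out : Option String) : Prop := out = hascumo_alt s1 s2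
instance (s1 : String) (s2 : String) (out : Option String) : Decidable (Spec_hascumo s1 s2 out) := by unfold Spec_hascumo; infer_instance

-- ===== CLAIM (what is proved, stated in full; the proofs are below) =====
def Claim_equal_hascumo : Prop := ∀ (s1 : String) (s2 : String), Dom_hascumo s1 s2 → Spec_hascumo s1 s2 (hascumo s1 s2)

-- ===== LEMMAS AND PROOFS =====

/-- Nat-indexed recursive characterisation of B's list of differing positions. -/
def diffsN : List (Char × Char) → List Nat
  | [] => []
  | (a, b) :: z => if a = b then (diffsN z).map (· + 1) else 0 :: (diffsN z).map (· + 1)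

theorem map_shift (d : List Nat) (s : Int) :
    d.map (fun (n : Nat) => (s + 1) + (n : Int))
      = (d.map (· + 1)).map (fun (n : Nat) => s + (n : Int)) := by
  induction d with
  | nil => simp
  | cons x xs ihd => simp only [List.map_cons, ihd]; congr 1; push_cast; ring

theorem bDiffs_shift (z : List (Char × Char)) : ∀ (s : Int),
    ((PySem.List.enumerate z s).filter (fun p => p.2.1 != p.2.2)).map Prod.fst
      = (diffsN z).map (fun (n : Nat) => s + (n : Int)) := by
  induction z with
  | nil => intro s; simp [PySem.List.enumerate_nil, diffsN]
  | cons p z ih =>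
    intro s
    obtain ⟨a, b⟩ := p
    by_cases h : a = b <;> simp [PySem.List.enumerate_cons, diffsN, h, ih (s + 1), map_shift]

theorem bDiffs_eq (z : List (Char × Char)) :
    bDiffs z = (diffsN z).map (fun (n : Nat) => (n : Int)) := by
  have := bDiffs_shift z 0
  simpa [bDiffs] using this

theorem goA_one (l1 : List Char) : ∀ (l2 : List Char) (acc : List Char),
    l1.length = l2.length →
    goA l1 l2 1 acc = if diffsN (l1.zip l2) = [] then some (acc.reverse ++ l1) else none := by
  induction l1 with
  | nil =>
    intro l2 acc h
    cases l2 with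
    | nil => simp [goA, diffsN]
    | cons b t2 => simp at h
  | cons a t1 ih =>
    intro l2 acc h
    cases l2 with
    | nil => simp at h
    | cons b t2 =>
      by_cases hab : a = b
      · subst hab
        simp only [goA, if_pos rfl, List.zip_cons_cons, diffsN, if_pos rfl]
        rw [ih t2 (a :: acc) (by simpa using h)]
        simp
      · simp [goA, hab, diffsN, List.zip_cons_cons]

theorem goA_zero (l1 : List Char) : ∀ (l2 : List Char) (acc : List Char),
    l1.length = l2.length →
    goA l1 l2 0 acc =
      match diffsN (l1.zip l2) with
      | [] => some (acc.reverse ++ l1)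
      | [j] =>
          if (l1.getD j ' ' = '0' ∨ l1.getD j ' ' = '1') ∧
             (l2.getD j ' ' = '0' ∨ l2.getD j ' ' = '1') then
            some (acc.reverse ++ l1.take j ++ 'x' :: l1.drop (j + 1))
          else none
      | _ => none := by
  induction l1 with
  | nil =>
    intro l2 acc h
    cases l2 with
    | nil => simp [goA, diffsN]
    | cons b t2 => simp at h
  | cons a t1 ih =>
    intro l2 acc h
    cases l2 with
    | nil => simp at h
    | cons b t2 =>
      have hlen : t1.length = t2.length := by simpa using h
      by_cases hab : a = b
      · subst hab
        simp only [goA, if_pos rfl, List.zip_cons_cons, diffsN, if_pos rfl]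
        rw [ih t2 (a :: acc) hlen]
        rcases hd : diffsN (t1.zip t2) with _ | ⟨j, _ | ⟨k, rest⟩⟩
        · simp
        · simp [List.getD_cons_succ, List.take_succ_cons, List.drop_succ_cons]
        · simp
      · simp only [goA, if_neg hab]
        split_ifs with hcond
        · rw [goA_one t1 t2 ('x' :: acc) hlen]
          rcases hd : diffsN (t1.zip t2) with _ | ⟨j, rest⟩
          · simp [diffsN, hab, hd, hcond.1, hcond.2.1]
          · simp [diffsN, hab, hd]
        · have h01 : ¬ ((a = '0' ∨ a = '1') ∧ (b = '0' ∨ b = '1')) := by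
            intro hc; exact hcond ⟨hc.1, hc.2, by trivial⟩
          rcases hd : diffsN (t1.zip t2) with _ | ⟨j, rest⟩
          · simp [diffsN, hab, hd, h01]
          · simp [diffsN, hab, hd]

-- ===== VERDICT (by name: the statement is the Claim_ definition above) =====
theorem hascumo_spec : Claim_equal_hascumo := by
  intro s1 s2 _
  unfold Spec_hascumo hascumo hascumo_alt
  set l1 := s1.toList with hl1
  set l2 := s2.toList with hl2
  by_cases hg : l1.length ≠ l2.length ∨ l1.length = 0
  · rw [if_pos hg, if_pos hg]
  · rw [if_neg hg, if_neg hg]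
    push_neg at hg
    have hlen : l1.length = l2.length := hg.1
    rw [goA_zero l1 l2 [] hlen, bDiffs_eq]
    rcases hd : diffsN (l1.zip l2) with _ | ⟨j, _ | ⟨k, rest⟩⟩
    · simp only [List.map_nil]
      simp [hl1]
    · simp only [List.map_cons, List.map_nil]
      have h1 : PySem.List.pyGetD l1 ((j : Nat) : Int) ' ' = l1.getD j ' ' :=
        PySem.List.pyGetD_natCast l1 j ' '
      have h2 : PySem.List.pyGetD l2 ((j : Nat) : Int) ' ' = l2.getD j ' ' :=
        PySem.List.pyGetD_natCast l2 j ' '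
      have hs1 : PySem.List.slice l1 none (some ((j : Nat) : Int)) = l1.take j :=
        PySem.List.slice_to_natCast l1 j
      have hs2 : PySem.List.slice l1 (some (((j : Nat) : Int) + 1)) none = l1.drop (j + 1) := by
        have : ((j : Nat) : Int) + 1 = (((j + 1 : Nat)) : Int) := by push_cast; ring
        rw [this]; exact PySem.List.slice_from_natCast l1 (j + 1)
      simp [h1, h2, hs1, hs2]
    · simp
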